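-- pv_equiv track=rewrite | github.com/psinghjpm/pr-reviewer | src/pr_reviewer/context/dependency_tracer.py | _module_to_path
-- ===== SOURCE A (Python) =====
-- def _module_to_path(module: str, repo_files: list[str]) -> str | None:
--     """Convert a dotted module name to a file path that exists in the repo."""
--     # Try direct mapping: foo.bar → foo/bar.py
--     candidate = module.replace(".", "/") + ".py"
--     for f in repo_files:
--         if f == candidate or f.endswith("/" + candidate):
--             return f
--     # Try __init__.py
--     pkg_candidate = module.replace(".", "/") + "/__init__.py"
--     for f in repo_files:
--         if f == pkg_candidate or f.endswith("/" + pkg_candidate):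
--             return f
--     return None
-- ===== SOURCE B (Python) =====
-- def _module_to_path(module: str, repo_files: list[str]) -> str | None:
--     """Single pass: direct 'foo/bar.py' match wins immediately; the first
--     'foo/bar/__init__.py' match is remembered as a fallback."""
--     base = module.replace(".", "/")
--     direct = base + ".py"
--     pkg = base + "/__init__.py"
--     fallback = None
--     for f in repo_files:
--         if f == direct or f.endswith("/" + direct):
--             return f
--         if fallback is None and (f == pkg or f.endswith("/" + pkg)):
--             fallback = f
--     return fallback
-- ===== Notes on version B (the rewrite author's own statement) =====
-- stated objective: alternative
-- what changed: Replaces A's two sequential scans of repo_files (direct candidate, then __init__ candidate) by a single pass that returns a direct match immediately and keeps the first package match as a fallback.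
import Mathlib
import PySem

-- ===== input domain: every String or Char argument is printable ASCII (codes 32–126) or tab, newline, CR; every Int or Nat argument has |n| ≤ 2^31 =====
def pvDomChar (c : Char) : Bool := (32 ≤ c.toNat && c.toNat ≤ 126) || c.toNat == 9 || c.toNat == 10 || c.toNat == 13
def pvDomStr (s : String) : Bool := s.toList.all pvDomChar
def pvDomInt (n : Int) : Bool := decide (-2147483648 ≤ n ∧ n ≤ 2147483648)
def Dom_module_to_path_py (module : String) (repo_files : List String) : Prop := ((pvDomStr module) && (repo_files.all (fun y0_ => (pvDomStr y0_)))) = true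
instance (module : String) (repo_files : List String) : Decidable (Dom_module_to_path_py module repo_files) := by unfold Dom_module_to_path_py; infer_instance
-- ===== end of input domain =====

-- B makes a single pass over repo_files (a direct match returns at once, the first __init__ match
-- is kept as a fallback) instead of A's two sequential scans; same cost, a different decomposition.

-- ===== PORT A =====
-- A's 'for f in repo_files: if f == cand or f.endswith("/" + cand): return f' loop
def pvFindA (cand : String) : List String → Option String
  | [] => none
  | f :: rest =>
      if (f == cand || PySem.Str.endswith f ("/" ++ cand)) then some f
      else pvFindA cand rest

def module_to_path_py (module : String) (repo_files : List String) : Option String :=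
  let candidate := PySem.Str.replace module "." "/" ++ ".py"
  match pvFindA candidate repo_files with
  | some f => some f
  | none =>
      let pkg_candidate := PySem.Str.replace module "." "/" ++ "/__init__.py"
      pvFindA pkg_candidate repo_files

-- ===== PORT B =====
-- B's single loop carrying the fallback accumulator
def pvScanB (direct pkg : String) (fallback : Option String) : List String → Option String
  | [] => fallback
  | f :: rest =>
      if (f == direct || PySem.Str.endswith f ("/" ++ direct)) then some f
      else
        pvScanB direct pkg
          (if fallback.isNone && (f == pkg || PySem.Str.endswith f ("/" ++ pkg)) then some f
           else fallback) rest

def module_to_path_py_alt (module : String) (repo_files : List String) : Option String :=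
  let base := PySem.Str.replace module "." "/"
  pvScanB (base ++ ".py") (base ++ "/__init__.py") none repo_files

-- ===== PRECONDITION & SPEC =====
def Spec_module_to_path_py (module : String) (repo_files : List String) (out : Option String) : Prop := out = module_to_path_py_alt module repo_files
instance (module : String) (repo_files : List String) (out : Option String) : Decidable (Spec_module_to_path_py module repo_files out) := by unfold Spec_module_to_path_py; infer_instance

-- ===== CLAIM (what is proved, stated in full; the proofs are below) =====
def Claim_equal_module_to_path_py : Prop := ∀ (module : String) (repo_files : List String), Dom_module_to_path_py module repo_files → Spec_module_to_path_py module repo_files (module_to_path_py module repo_files)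

-- ===== LEMMAS AND PROOFS =====

-- The single scan with fallback accumulator equals: first direct match, else the stored
-- fallback, else the first pkg match.
theorem pvScanB_eq (d p : String) (fs : List String) : ∀ (fb : Option String),
    pvScanB d p fb fs =
      match pvFindA d fs with
      | some f => some f
      | none => match fb with
        | some x => some x
        | none => pvFindA p fs := by
  induction fs with
  | nil => intro fb; cases fb <;> rfl
  | cons f rest ih =>
      intro fb
      by_cases hd : (f == d || PySem.Str.endswith f ("/" ++ d)) = true
      · rw [pvScanB, pvFindA, if_pos hd, if_pos hd]
      · rw [pvScanB, pvFindA, if_neg hd, if_neg hd, ih]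
        cases hFd : pvFindA d rest with
        | some g => simp
        | none =>
            cases fb with
            | some x => simp
            | none =>
                simp only [pvFindA]
                split_ifs <;> simp_all

-- ===== VERDICT (by name: the statement is the Claim_ definition above) =====
theorem module_to_path_py_spec : Claim_equal_module_to_path_py := by
  intro module repo_files _
  unfold Spec_module_to_path_py module_to_path_py module_to_path_py_alt
  rw [pvScanB_eq]
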